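-- pv_equiv track=rewrite | github.com/dgsim126/Algo_Study_2 | Programmers/심동근/2505/250503/Magnetic.py | solution
-- ===== SOURCE A (Python) =====
-- from collections import deque
--
-- def solution(n, board):
--     cnt= 0
--
--     for i in range(n):
--         lst= deque()
--
--         for j in range(n):
--             if(board[j][i]!=0):
--                 lst.append(board[j][i])
--
--         while(lst):
--             if(lst[0]==2):
--                 lst.popleft()
--             else:
--                 break
--
--         while(lst):
--             if(lst[-1]==1):
--                 lst.pop()
--             else:
--                 break
--
--         temp= 0
--
--         while(len(lst)>1):
--             if(lst[0]==1 and lst[1]==2):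
--                 cnt+=1
--                 temp+=1
--                 lst.popleft()
--                 lst.popleft()
--             else:
--                 lst.popleft()
--     return cnt
-- ===== SOURCE B (Python) =====
-- def solution(n, board):
--     cnt = 0
--     for i in range(n):
--         col = [board[j][i] for j in range(n) if board[j][i] != 0]
--         cnt += sum(1 for a, b in zip(col, col[1:]) if a == 1 and b == 2)
--     return cnt
-- ===== Notes on version B (the rewrite author's own statement) =====
-- stated objective: simpler
-- what changed: B drops A's deque, the leading-2/trailing-1 trimming loops and the greedy pair-consuming while-loop: it just counts adjacent (1,2) pairs in each zero-compacted column with a single zip scan, which is provably the same count because 1->2 adjacencies cannot overlap and trimmed elements never form such a pair.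
import Mathlib
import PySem

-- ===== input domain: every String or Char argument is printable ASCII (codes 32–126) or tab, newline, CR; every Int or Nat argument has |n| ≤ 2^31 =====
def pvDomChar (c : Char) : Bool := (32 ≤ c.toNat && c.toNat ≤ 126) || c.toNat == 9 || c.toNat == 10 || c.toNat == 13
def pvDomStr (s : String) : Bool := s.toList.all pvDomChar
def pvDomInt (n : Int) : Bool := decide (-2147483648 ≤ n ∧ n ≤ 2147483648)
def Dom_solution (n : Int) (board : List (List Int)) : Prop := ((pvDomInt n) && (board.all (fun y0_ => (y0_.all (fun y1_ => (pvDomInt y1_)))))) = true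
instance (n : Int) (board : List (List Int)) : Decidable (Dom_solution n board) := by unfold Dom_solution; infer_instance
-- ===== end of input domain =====

-- B replaces A's deque with trimming and greedy pair-popping by a plain zip scan counting
-- adjacent (1,2) pairs per zero-compacted column (simpler; same count, proved below).

-- ===== PORT A =====
-- the zero-filtered column i, built exactly as A's inner j-loop appends
def colA (n : Int) (board : List (List Int)) (i : Int) : List Int :=
  (PySem.List.pyRange 0 n 1).foldl (fun acc j =>
    if PySem.List.pyGetD (PySem.List.pyGetD board j []) i 0 ≠ 0 then
      acc ++ [PySem.List.pyGetD (PySem.List.pyGetD board j []) i 0]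
    else acc) []

-- 'while lst and lst[0]==2: popleft()'
def trimLead : List Int → List Int
  | [] => []
  | x :: r => if x = 2 then trimLead r else x :: r

-- 'while lst and lst[-1]==1: pop()'
def trimTrail (l : List Int) : List Int :=
  if h : l ≠ [] ∧ l.getLast? = some 1 then trimTrail l.dropLast else l
termination_by l.length
decreasing_by
  cases l with
  | nil => exact absurd rfl h.1
  | cons a r => simp

-- 'while len(lst)>1: if lst[0]==1 and lst[1]==2: cnt+=1; popleft; popleft else popleft'
def greedy : List Int → Int
  | a :: b :: r => if a = 1 ∧ b = 2 then 1 + greedy r else greedy (b :: r)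
  | _ => 0
termination_by l => l.length

def solution (n : Int) (board : List (List Int)) : Int :=
  (PySem.List.pyRange 0 n 1).foldl
    (fun cnt i => cnt + greedy (trimTrail (trimLead (colA n board i)))) 0

-- ===== PORT B =====
-- '[board[j][i] for j in range(n) if board[j][i] != 0]'
def colB (n : Int) (board : List (List Int)) (i : Int) : List Int :=
  ((PySem.List.pyRange 0 n 1).map
      (fun j => PySem.List.pyGetD (PySem.List.pyGetD board j []) i 0)).filter (· ≠ 0)

def solution_alt (n : Int) (board : List (List Int)) : Int :=
  (PySem.List.pyRange 0 n 1).foldl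
    (fun cnt i =>
      cnt + (((colB n board i).zip (colB n board i).tail).countP
                (fun p => p.1 == 1 && p.2 == 2) : Int)) 0

-- ===== PRECONDITION & SPEC =====
-- Pre_ excludes exactly the inputs where A raises IndexError: board must provide
-- at least n rows, each row of length ≥ n for the rows the loops index.
def Pre_solution (n : Int) (board : List (List Int)) : Prop :=
  n ≤ (board.length : Int) ∧ ∀ row ∈ board.take n.toNat, n ≤ (row.length : Int)
instance (n : Int) (board : List (List Int)) : Decidable (Pre_solution n board) := by
  unfold Pre_solution; infer_instance

def pvWitness_solution : Int × List (List Int) := (2, [[1, 2], [0, 1]])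

def Spec_solution (n : Int) (board : List (List Int)) (out : Int) : Prop := out = solution_alt n board
instance (n : Int) (board : List (List Int)) (out : Int) : Decidable (Spec_solution n board out) := by unfold Spec_solution; infer_instance

-- ===== CLAIM (what is proved, stated in full; the proofs are below) =====
def Claim_equal_solution : Prop := ∀ (n : Int) (board : List (List Int)), Dom_solution n board → Pre_solution n board → Spec_solution n board (solution n board)

-- ===== LEMMAS AND PROOFS =====

-- recursive characterization of B's pair count
def cp : List Int → Int
  | a :: b :: r => (if a = 1 ∧ b = 2 then 1 else 0) + cp (b :: r)
  | _ => 0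

theorem cp_eq_countP (l : List Int) :
    ((l.zip l.tail).countP (fun p => p.1 == 1 && p.2 == 2) : Int) = cp l := by
  fun_induction cp l with
  | case1 a b r ih =>
    simp only [List.tail_cons, List.zip_cons_cons, List.countP_cons] at *
    split_ifs with h <;> simp_all <;> omega
  | case2 l h => cases l with
    | nil => simp
    | cons a r => cases r with
      | nil => simp
      | cons b r => exact absurd rfl (h a b r)

theorem cp_cons_ne_one (a : Int) (l : List Int) (h : a ≠ 1) : cp (a :: l) = cp l := by
  cases l with
  | nil => simp [cp]
  | cons b r => simp [cp, h]

theorem cp_trimLead (l : List Int) : cp (trimLead l) = cp l := by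
  fun_induction trimLead l with
  | case1 => rfl
  | case2 r ih => rw [ih, cp_cons_ne_one 2 r (by norm_num)]
  | case3 => rfl

theorem cp_append_one (l : List Int) : cp (l ++ [1]) = cp l := by
  induction l with
  | nil => simp [cp]
  | cons a r ih =>
    cases r with
    | nil => simp [cp]
    | cons b s =>
      simp only [List.cons_append] at *
      rw [cp, cp, ih]

theorem cp_trimTrail (l : List Int) : cp (trimTrail l) = cp l := by
  fun_induction trimTrail l with
  | case1 l h ih =>
    rw [ih]
    conv_rhs => rw [← List.dropLast_append_getLast h.1]
    rw [List.getLast_eq_iff_getLast?_eq_some h.1 |>.mpr h.2]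
    exact (cp_append_one _).symm
  | case2 => rfl

theorem greedy_eq_cp (l : List Int) : greedy l = cp l := by
  fun_induction greedy l with
  | case1 a b r h ih =>
    rw [cp, if_pos h, ih, h.2, cp_cons_ne_one 2 r (by norm_num)]
  | case2 a b r h ih => rw [cp, if_neg h, ih, zero_add]
  | case3 l h => cases l with
    | nil => rfl
    | cons a r => cases r with
      | nil => rfl
      | cons b r => exact absurd rfl (h a b r)

theorem colA_eq_colB (n : Int) (board : List (List Int)) (i : Int) :
    colA n board i = colB n board i := by
  unfold colA colB
  rw [PySem.List.foldl_append_ite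
        (fun j => PySem.List.pyGetD (PySem.List.pyGetD board j []) i 0 ≠ 0)
        (fun j => PySem.List.pyGetD (PySem.List.pyGetD board j []) i 0)]
  simp [List.filter_map, Function.comp_def]

theorem percol (n : Int) (board : List (List Int)) (i : Int) :
    greedy (trimTrail (trimLead (colA n board i)))
      = (((colB n board i).zip (colB n board i).tail).countP
            (fun p => p.1 == 1 && p.2 == 2) : Int) := by
  rw [greedy_eq_cp, cp_trimTrail, cp_trimLead, cp_eq_countP, colA_eq_colB]

-- ===== VERDICT (by name: the statement is the Claim_ definition above) =====
theorem solution_spec : Claim_equal_solution := by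
  intro n board _ _
  unfold Spec_solution solution solution_alt
  have hf : (fun (cnt : Int) i => cnt + greedy (trimTrail (trimLead (colA n board i))))
      = (fun (cnt : Int) i =>
          cnt + (((colB n board i).zip (colB n board i).tail).countP
                    (fun p => p.1 == 1 && p.2 == 2) : Int)) := by
    funext cnt i; rw [percol]
  rw [hf]
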